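-- pv_equiv track=rewrite | github.com/JamieKalloe/ISCRIPT | Week 4/Opdracht17.py | gegroepeerd
-- ===== SOURCE A (Python) =====
-- def gegroepeerd(prijzen):
--     totaal = 0
--     for index in range(0, len(prijzen)):
--         hoogsteIndex = len(prijzen[index]) - 1
--         if hoogsteIndex == 3:
--             totaal += sum(prijzen[index][0:len(prijzen[index]) - 1])
--         else:
--             totaal += sum(prijzen[index])
--
--     return totaal
-- ===== SOURCE B (Python) =====
-- def gegroepeerd(prijzen):
--     totaal = sum(sum(sub) for sub in prijzen)
--     correctie = sum(sub[-1] for sub in prijzen if len(sub) == 4)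
--     return totaal - correctie
-- ===== Notes on version B (the rewrite author's own statement) =====
-- stated objective: simpler
-- what changed: Replaces the index-based loop with a per-sublist if/else by one full aggregation (sum of all sums) minus a correction term (sum of last elements of the length-4 sublists).
import Mathlib
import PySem

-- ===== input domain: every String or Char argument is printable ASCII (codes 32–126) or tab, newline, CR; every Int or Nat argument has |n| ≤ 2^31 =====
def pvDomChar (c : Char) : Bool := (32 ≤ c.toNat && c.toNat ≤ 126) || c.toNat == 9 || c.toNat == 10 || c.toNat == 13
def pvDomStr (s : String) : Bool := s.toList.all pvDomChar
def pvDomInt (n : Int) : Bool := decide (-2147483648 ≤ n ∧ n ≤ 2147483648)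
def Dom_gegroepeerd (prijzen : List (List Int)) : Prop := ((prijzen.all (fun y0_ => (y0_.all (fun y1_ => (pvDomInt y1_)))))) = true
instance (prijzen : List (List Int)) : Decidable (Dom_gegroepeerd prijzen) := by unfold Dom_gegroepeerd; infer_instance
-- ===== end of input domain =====

-- B computes the grand total of all sums minus a correction (last elements of length-4 sublists), replacing A's indexed loop with per-sublist branching.


-- ===== PORT A =====
def gegroepeerd (prijzen : List (List Int)) : Int :=
  (PySem.List.pyRange 0 ((prijzen.length : Int)) 1).foldl (fun totaal index =>
    let sub := PySem.List.pyGetD prijzen index []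
    let hoogsteIndex : Int := (sub.length : Int) - 1
    if hoogsteIndex = 3 then
      totaal + (PySem.List.slice sub (some 0) (some ((sub.length : Int) - 1))).sum
    else
      totaal + sub.sum) 0

-- ===== PORT B =====
def gegroepeerd_alt (prijzen : List (List Int)) : Int :=
  (prijzen.map List.sum).sum
    - ((prijzen.filter (fun sub => sub.length == 4)).map
        (fun sub => PySem.List.pyGetD sub (-1) 0)).sum

-- ===== PRECONDITION & SPEC =====
def Spec_gegroepeerd (prijzen : List (List Int)) (out : Int) : Prop := out = gegroepeerd_alt prijzen
instance (prijzen : List (List Int)) (out : Int) : Decidable (Spec_gegroepeerd prijzen out) := by unfold Spec_gegroepeerd; infer_instance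

-- ===== CLAIM (what is proved, stated in full; the proofs are below) =====
def Claim_equal_gegroepeerd : Prop := ∀ (prijzen : List (List Int)), Dom_gegroepeerd prijzen → Spec_gegroepeerd prijzen (gegroepeerd prijzen)

-- ===== LEMMAS AND PROOFS =====

-- A's per-sublist step, after the range/index loop is rewritten into a fold over the list itself
def stepA (totaal : Int) (sub : List Int) : Int :=
  if (sub.length : Int) - 1 = 3 then
    totaal + (PySem.List.slice sub (some 0) (some ((sub.length : Int) - 1))).sum
  else
    totaal + sub.sum

theorem gegroepeerd_eq_foldl (prijzen : List (List Int)) :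
    gegroepeerd prijzen = prijzen.foldl stepA 0 := by
  unfold gegroepeerd stepA
  have := PySem.List.foldl_pyRange_pyGetD (xs := prijzen) (a := 0)
    (f := stepA) (d := ([] : List Int)) (init := (0 : Int)) (le_refl 0)
  simpa [stepA] using this

theorem foldl_stepA (prijzen : List (List Int)) (init : Int) :
    prijzen.foldl stepA init =
      init + (prijzen.map List.sum).sum
        - ((prijzen.filter (fun sub => sub.length == 4)).map
            (fun sub => PySem.List.pyGetD sub (-1) 0)).sum := by
  induction prijzen generalizing init with
  | nil => simp
  | cons sub rest ih =>
    simp only [List.foldl_cons, List.filter_cons, List.map_cons, List.sum_cons]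
    rw [ih]
    by_cases h4 : sub.length = 4
    · obtain ⟨a, b, c, d, hsub⟩ : ∃ a b c d, sub = [a, b, c, d] := by
        match sub, h4 with
        | [a, b, c, d], _ => exact ⟨a, b, c, d, rfl⟩
      subst hsub
      simp [stepA, PySem.List.slice, PySem.List.pyGetD, PySem.List.pyGet?,
        PySem.List.pyIdx?]
      ring
    · have hne : ((sub.length : Int) - 1 = 3) ↔ False := by
        constructor
        · intro h; exact h4 (by omega)
        · exact False.elim
      simp [stepA, hne, h4]
      ring

-- ===== VERDICT (by name: the statement is the Claim_ definition above) =====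
theorem gegroepeerd_spec : Claim_equal_gegroepeerd := by
  intro prijzen _
  unfold Spec_gegroepeerd gegroepeerd_alt
  rw [gegroepeerd_eq_foldl, foldl_stepA]
  ring
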